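-- pv_equiv track=rewrite | github.com/ehrlich-b/pixoo | mandelbrot_zoom.py | build_tour
-- ===== SOURCE A (Python) =====
-- def build_tour(targets: list, doubles: list, n: int, doubles_pct: int = 25
--                ) -> list[tuple[str, tuple]]:
--     """Interleave double-deep targets at `doubles_pct` of slots (0–100)."""
--     tour: list[tuple[str, tuple]] = []
--     ti = di = 0
--     pct = 0 if not doubles else max(0, min(100, doubles_pct))
--     for i in range(n):
--         use_double = (i * pct) // 100 < ((i + 1) * pct) // 100
--         if use_double:
--             tour.append(("double", doubles[di % len(doubles)]))
--             di += 1
--         else: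
--             tour.append(("single", targets[ti % len(targets)]))
--             ti += 1
--     return tour
-- ===== SOURCE B (Python) =====
-- def build_tour(targets: list, doubles: list, n: int, doubles_pct: int = 25
--                ) -> list[tuple[str, tuple]]:
--     """Interleave double-deep targets at `doubles_pct` of slots (0-100)."""
--     pct = 0 if not doubles else max(0, min(100, doubles_pct))
--     tour: list[tuple[str, tuple]] = []
--     err = 0
--     ts, ds = list(targets), list(doubles)
--     for _ in range(n):
--         err += pct
--         if err >= 100:
--             err -= 100
--             tour.append(("double", ds[0]))
--             ds = ds[1:] + ds[:1]
--         else: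
--             tour.append(("single", ts[0]))
--             ts = ts[1:] + ts[:1]
--     return tour
-- ===== Notes on version B (the rewrite author's own statement) =====
-- stated objective: alternative
-- what changed: Replaced the multiply-and-floordiv slot test and the ti/di modulo counters by a Bresenham-style error accumulator (err += pct; emit a double when err reaches 100) and by rotating the two lists in place, so B uses no multiplication, floor division or modulo at all.
import Mathlib
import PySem

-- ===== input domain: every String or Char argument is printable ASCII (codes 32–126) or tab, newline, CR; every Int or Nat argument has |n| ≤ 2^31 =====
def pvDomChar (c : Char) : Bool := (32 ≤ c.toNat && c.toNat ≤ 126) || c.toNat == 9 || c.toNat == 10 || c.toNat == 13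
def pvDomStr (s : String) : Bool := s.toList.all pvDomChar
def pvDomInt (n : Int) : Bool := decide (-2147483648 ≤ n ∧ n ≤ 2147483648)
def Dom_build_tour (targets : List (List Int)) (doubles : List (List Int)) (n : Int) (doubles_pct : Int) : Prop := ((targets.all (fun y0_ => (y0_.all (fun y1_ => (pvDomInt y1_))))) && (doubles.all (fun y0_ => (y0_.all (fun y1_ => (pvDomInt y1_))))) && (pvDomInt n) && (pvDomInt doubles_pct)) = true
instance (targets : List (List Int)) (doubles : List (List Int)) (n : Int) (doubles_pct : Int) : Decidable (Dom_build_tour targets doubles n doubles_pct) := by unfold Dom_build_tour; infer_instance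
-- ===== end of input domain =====

-- B replaces A's floordiv slot test and ti/di modulo counters by a Bresenham-style error accumulator with list rotation (alternative algorithm, same cost).


-- ===== PORT A =====
-- one loop step of A: state = (tour, ti, di)
def buildTourStepA (targets doubles : List (List Int)) (pct : Int)
    (st : List (String × List Int) × Int × Int) (i : Int) :
    List (String × List Int) × Int × Int :=
  let tour := st.1  -- kept in reverse; reversed once at the end (linear, same appends)
  let ti := st.2.1
  let di := st.2.2
  let use_double := PySem.Int.floordiv (i * pct) 100 < PySem.Int.floordiv ((i + 1) * pct) 100
  if use_double then
    (("double", PySem.List.pyGetD doubles (PySem.Int.mod di (doubles.length : Int)) []) :: tour, ti, di + 1)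
  else
    (("single", PySem.List.pyGetD targets (PySem.Int.mod ti (targets.length : Int)) []) :: tour, ti + 1, di)

def build_tour (targets : List (List Int)) (doubles : List (List Int)) (n : Int) (doubles_pct : Int) : List (String × List Int) :=
  let pct : Int := if doubles = [] then 0 else max 0 (min 100 doubles_pct)
  ((PySem.List.pyRange 0 n 1).foldl (buildTourStepA targets doubles pct) ([], 0, 0)).1.reverse

-- ===== PORT B =====
-- Source B's list rotation ds = ds[1:] + ds[:1]
def pyRotB (l : List (List Int)) : List (List Int) := l.drop 1 ++ l.take 1

-- Source B's loop: fuel = remaining iterations, state = (err, ts, ds); output built front-to-back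
def buildTourGoB (pct : Int) : Nat → Int → List (List Int) → List (List Int) →
    List (String × List Int) → List (String × List Int)
  | 0, _, _, _, acc => acc.reverse
  | Nat.succ k, err, ts, ds, acc =>
      let e := err + pct
      if e ≥ 100 then
        buildTourGoB pct k (e - 100) ts (pyRotB ds) (("double", ds.headD []) :: acc)
      else
        buildTourGoB pct k e (pyRotB ts) ds (("single", ts.headD []) :: acc)

def build_tour_alt (targets : List (List Int)) (doubles : List (List Int)) (n : Int) (doubles_pct : Int) : List (String × List Int) :=
  let pct : Int := if doubles = [] then 0 else max 0 (min 100 doubles_pct)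
  buildTourGoB pct n.toNat 0 targets doubles []

-- ===== PRECONDITION & SPEC =====
-- Pre_ excludes exactly the inputs where Python A raises (ZeroDivisionError): some slot is a
-- single while targets is empty (i.e. targets = [], n > 0, and the effective pct is not 100);
-- Python B raises there too (IndexError).
def Pre_build_tour (targets : List (List Int)) (doubles : List (List Int)) (n : Int) (doubles_pct : Int) : Prop :=
  targets ≠ [] ∨ n ≤ 0 ∨ (doubles ≠ [] ∧ 100 ≤ doubles_pct)
instance (targets : List (List Int)) (doubles : List (List Int)) (n : Int) (doubles_pct : Int) : Decidable (Pre_build_tour targets doubles n doubles_pct) := by unfold Pre_build_tour; infer_instance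

def pvWitness_build_tour : List (List Int) × List (List Int) × Int × Int := ([[1], [2]], [[3]], 5, 50)

def Spec_build_tour (targets : List (List Int)) (doubles : List (List Int)) (n : Int) (doubles_pct : Int) (out : List (String × List Int)) : Prop := out = build_tour_alt targets doubles n doubles_pct
instance (targets : List (List Int)) (doubles : List (List Int)) (n : Int) (doubles_pct : Int) (out : List (String × List Int)) : Decidable (Spec_build_tour targets doubles n doubles_pct out) := by unfold Spec_build_tour; infer_instance

-- ===== CLAIM (what is proved, stated in full; the proofs are below) =====
def Claim_equal_build_tour : Prop := ∀ (targets : List (List Int)) (doubles : List (List Int)) (n : Int) (doubles_pct : Int), Dom_build_tour targets doubles n doubles_pct → Pre_build_tour targets doubles n doubles_pct → Spec_build_tour targets doubles n doubles_pct (build_tour targets doubles n doubles_pct)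

-- ===== LEMMAS AND PROOFS =====

-- the prefix count of doubles among slots 0..i-1
def ndCount (pct i : Int) : Int := PySem.Int.floordiv (i * pct) 100

-- common reference form: the i-th slot in closed form
def slotRef (targets doubles : List (List Int)) (pct : Int) (i : Int) :
    String × List Int :=
  if PySem.Int.floordiv ((i + 1) * pct) 100 > ndCount pct i then
    ("double", PySem.List.pyGetD doubles (PySem.Int.mod (ndCount pct i) (doubles.length : Int)) [])
  else
    ("single", PySem.List.pyGetD targets (PySem.Int.mod (i - ndCount pct i) (targets.length : Int)) [])

-- the count advances by 0 or 1 per slot; 'use_double' is exactly 'it advances'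
lemma nd_step (pct i : Int) (h0 : 0 ≤ pct) (h1 : pct ≤ 100) :
    ndCount pct i ≤ ndCount pct (i + 1) ∧ ndCount pct (i + 1) ≤ ndCount pct i + 1 := by
  unfold ndCount
  have e1 := PySem.Int.floordiv_mul_add_mod (i * pct) 100
  have e2 := PySem.Int.floordiv_mul_add_mod ((i + 1) * pct) 100
  have m1a := PySem.Int.mod_nonneg (i * pct) (b := 100) (by omega)
  have m1b := PySem.Int.mod_lt (i * pct) (b := 100) (by omega)
  have m2a := PySem.Int.mod_nonneg ((i + 1) * pct) (b := 100) (by omega)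
  have m2b := PySem.Int.mod_lt ((i + 1) * pct) (b := 100) (by omega)
  have hx : (i + 1) * pct = i * pct + pct := by ring
  rw [hx] at e2 m2a m2b ⊢
  constructor <;> omega

-- A-side loop invariant: after slots 0..m-1, A's state is (reference map, m - ndCount m, ndCount m)
lemma loop_invariant (targets doubles : List (List Int)) (pct : Int)
    (h0 : 0 ≤ pct) (h1 : pct ≤ 100) (m : Nat) :
    (PySem.List.pyRange 0 (m : Int) 1).foldl (buildTourStepA targets doubles pct) ([], 0, 0) =
      (((PySem.List.pyRange 0 (m : Int) 1).map (slotRef targets doubles pct)).reverse,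
        (m : Int) - ndCount pct m, ndCount pct m) := by
  induction m with
  | zero =>
      simp [PySem.List.pyRange_one_eq_nil (by omega : (0:Int) ≤ 0), ndCount,
        PySem.Int.floordiv]
  | succ k ih =>
      have hsplit : PySem.List.pyRange 0 ((k + 1 : Nat) : Int) 1 =
          PySem.List.pyRange 0 (k : Int) 1 ++ [(k : Int)] := by
        have := PySem.List.pyRange_one_succ_right (a := 0) (b := (k : Int)) (by omega)
        rw [show ((k + 1 : Nat) : Int) = (k : Int) + 1 by push_cast; ring, this]
      rw [hsplit, List.foldl_append, List.map_append, List.reverse_append, ih]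
      obtain ⟨hle, hlt⟩ := nd_step pct (k : Int) h0 h1
      have hcast : ((k + 1 : Nat) : Int) = ((k : Nat) : Int) + 1 := by push_cast; ring
      simp only [List.foldl_cons, List.foldl_nil, List.map_cons, List.map_nil,
        List.reverse_cons, List.reverse_nil, List.nil_append, List.singleton_append]
      simp only [ndCount] at hle hlt ⊢
      unfold buildTourStepA slotRef ndCount
      dsimp only
      by_cases hd : PySem.Int.floordiv ((k : Int) * pct) 100 <
          PySem.Int.floordiv (((k : Int) + 1) * pct) 100
      · simp only [gt_iff_lt, if_pos hd, Prod.mk.injEq]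
        refine ⟨trivial, ?_, ?_⟩ <;> rw [hcast] <;> omega
      · simp only [gt_iff_lt, if_neg hd, Prod.mk.injEq]
        refine ⟨trivial, ?_, ?_⟩ <;> rw [hcast] <;> omega

-- B-side rotation facts
lemma pyRotB_eq_rotate (l : List (List Int)) : pyRotB l = l.rotate 1 := by
  cases l with
  | nil => rfl
  | cons x xs => simp [pyRotB, List.rotate_cons_succ]

lemma rotate_headD (l : List (List Int)) (k : Nat) :
    (l.rotate k).headD [] = PySem.List.pyGetD l (PySem.Int.mod (k : Int) (l.length : Int)) [] := by
  cases l with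
  | nil => simp [List.rotate, PySem.List.pyGetD, PySem.List.pyGet?, PySem.List.pyIdx?]
  | cons x xs =>
      have hlen : 0 < (x :: xs).length := by simp
      have hrlt : k % (x :: xs).length < (x :: xs).length := Nat.mod_lt _ hlen
      have hrot : (x :: xs).rotate k =
          (x :: xs).drop (k % (x :: xs).length) ++ (x :: xs).take (k % (x :: xs).length) := by
        rw [← List.rotate_mod]
        exact List.rotate_eq_drop_append_take (le_of_lt hrlt)
      rw [hrot, List.drop_eq_getElem_cons hrlt]
      simp only [List.cons_append, List.headD_cons]
      rw [show (PySem.Int.mod (k : Int) ((x :: xs).length : Int)) =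
            (((k % (x :: xs).length : Nat)) : Int) from
          PySem.Int.mod_natCast k (x :: xs).length]
      rw [PySem.List.pyGetD_natCast]
      rw [List.getD_eq_getElem _ _ hrlt]

-- err/count step in closed form
lemma err_step (pct a : Int) (h0 : 0 ≤ pct) (h1 : pct ≤ 100) :
    (PySem.Int.mod a 100 + pct ≥ 100 →
      PySem.Int.floordiv (a + pct) 100 = PySem.Int.floordiv a 100 + 1 ∧
      PySem.Int.mod (a + pct) 100 = PySem.Int.mod a 100 + pct - 100) ∧
    (¬ PySem.Int.mod a 100 + pct ≥ 100 →
      PySem.Int.floordiv (a + pct) 100 = PySem.Int.floordiv a 100 ∧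
      PySem.Int.mod (a + pct) 100 = PySem.Int.mod a 100 + pct) := by
  have e1 := PySem.Int.floordiv_mul_add_mod a 100
  have e2 := PySem.Int.floordiv_mul_add_mod (a + pct) 100
  have m1a := PySem.Int.mod_nonneg a (b := 100) (by omega)
  have m1b := PySem.Int.mod_lt a (b := 100) (by omega)
  have m2a := PySem.Int.mod_nonneg (a + pct) (b := 100) (by omega)
  have m2b := PySem.Int.mod_lt (a + pct) (b := 100) (by omega)
  constructor <;> intro h <;> constructor <;> omega

-- bounds on ndCount
lemma nd_bounds (pct : Int) (m : Nat) (h0 : 0 ≤ pct) (h1 : pct ≤ 100) :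
    0 ≤ ndCount pct (m : Int) ∧ ndCount pct (m : Int) ≤ (m : Int) := by
  unfold ndCount
  have e1 := PySem.Int.floordiv_mul_add_mod ((m : Int) * pct) 100
  have m1a := PySem.Int.mod_nonneg ((m : Int) * pct) (b := 100) (by omega)
  have m1b := PySem.Int.mod_lt ((m : Int) * pct) (b := 100) (by omega)
  have hmn : (0 : Int) ≤ (m : Int) := by positivity
  have hp1 : 0 ≤ (m : Int) * pct := mul_nonneg hmn h0
  have hp2 : (m : Int) * pct ≤ 100 * (m : Int) := by nlinarith
  constructor <;> omega

-- B-side loop invariant: with err = (m*pct) mod 100 and the lists rotated by the two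
-- counts, the B loop produces exactly the reference slots m, m+1, …, m+k-1
lemma go_eq (targets doubles : List (List Int)) (pct : Int)
    (h0 : 0 ≤ pct) (h1 : pct ≤ 100) :
    ∀ (k m : Nat) (acc : List (String × List Int)),
      buildTourGoB pct k (PySem.Int.mod ((m : Int) * pct) 100)
          (targets.rotate ((m : Int) - ndCount pct (m : Int)).toNat)
          (doubles.rotate (ndCount pct (m : Int)).toNat) acc =
        acc.reverse ++ (PySem.List.pyRange (m : Int) ((m : Int) + (k : Int)) 1).map (slotRef targets doubles pct) := by
  intro k
  induction k with
  | zero =>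
      intro m acc
      simp [buildTourGoB]
  | succ j ih =>
      intro m acc
      have hcons : PySem.List.pyRange (m : Int) ((m : Int) + ((j+1 : Nat) : Int)) 1 =
          (m : Int) :: PySem.List.pyRange ((m : Int) + 1) ((m : Int) + ((j+1 : Nat) : Int)) 1 := by
        exact PySem.List.pyRange_one_cons (by push_cast; omega)
      rw [hcons, List.map_cons]
      obtain ⟨hnd0, hndm⟩ := nd_bounds pct m h0 h1
      obtain ⟨hnd0', hndm'⟩ := nd_bounds pct (m+1) h0 h1
      have hes := err_step pct ((m : Int) * pct) h0 h1
      have hsucc : ((m : Int) + 1) * pct = (m : Int) * pct + pct := by ring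
      have hc1 : (((m+1 : Nat)) : Int) = (m : Int) + 1 := by push_cast; ring
      have ihm := fun acc => ih (m+1) acc
      unfold buildTourGoB
      dsimp only
      by_cases hd : PySem.Int.mod ((m : Int) * pct) 100 + pct ≥ 100
      · obtain ⟨hq, he⟩ := hes.1 hd
        rw [if_pos hd]
        have hslot : slotRef targets doubles pct (m : Int) =
            ("double", PySem.List.pyGetD doubles
              (PySem.Int.mod (ndCount pct (m : Int)) (doubles.length : Int)) []) := by
          unfold slotRef
          rw [if_pos (by unfold ndCount; rw [hsucc]; omega)]
        rw [hslot]
        have hnd1 : ndCount pct (((m+1 : Nat)) : Int) = ndCount pct (m : Int) + 1 := by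
          unfold ndCount; rw [hc1, hsucc]; omega
        have herr : PySem.Int.mod ((((m+1 : Nat)) : Int) * pct) 100 =
            PySem.Int.mod ((m : Int) * pct) 100 + pct - 100 := by
          rw [hc1, hsucc]; omega
        rw [rotate_headD, Int.toNat_of_nonneg hnd0, pyRotB_eq_rotate, List.rotate_rotate]
        have h1' : (ndCount pct (m : Int)).toNat + 1 = (ndCount pct (((m+1 : Nat)) : Int)).toNat := by
          omega
        have h2' : ((m : Int) - ndCount pct (m : Int)).toNat =
            ((((m+1 : Nat)) : Int) - ndCount pct (((m+1 : Nat)) : Int)).toNat := by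
          rw [hc1] at hnd1 ⊢
          omega
        rw [h1', h2', ← herr, ihm, hc1,
          show (m : Int) + 1 + (j : Nat) = (m : Int) + ((j + 1 : Nat) : Int) by push_cast; ring]
        simp [List.reverse_cons, List.append_assoc]
      · obtain ⟨hq, he⟩ := hes.2 hd
        rw [if_neg hd]
        have hslot : slotRef targets doubles pct (m : Int) =
            ("single", PySem.List.pyGetD targets
              (PySem.Int.mod ((m : Int) - ndCount pct (m : Int)) (targets.length : Int)) []) := by
          unfold slotRef
          rw [if_neg (by unfold ndCount; rw [hsucc]; omega)]
        rw [hslot]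
        have hnd1 : ndCount pct (((m+1 : Nat)) : Int) = ndCount pct (m : Int) := by
          unfold ndCount; rw [hc1, hsucc]; omega
        have herr : PySem.Int.mod ((((m+1 : Nat)) : Int) * pct) 100 =
            PySem.Int.mod ((m : Int) * pct) 100 + pct := by
          rw [hc1, hsucc]; omega
        rw [rotate_headD, Int.toNat_of_nonneg (by omega), pyRotB_eq_rotate, List.rotate_rotate]
        have h1' : (ndCount pct (m : Int)).toNat = (ndCount pct (((m+1 : Nat)) : Int)).toNat := by
          omega
        have h2' : ((m : Int) - ndCount pct (m : Int)).toNat + 1 =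
            ((((m+1 : Nat)) : Int) - ndCount pct (((m+1 : Nat)) : Int)).toNat := by
          rw [hc1] at hnd1 ⊢
          omega
        rw [h2', h1', ← herr, ihm, hc1,
          show (m : Int) + 1 + (j : Nat) = (m : Int) + ((j + 1 : Nat) : Int) by push_cast; ring]
        simp [List.reverse_cons, List.append_assoc]

-- ===== VERDICT (by name: the statement is the Claim_ definition above) =====
theorem build_tour_spec : Claim_equal_build_tour := by
  intro targets doubles n doubles_pct _ _
  show build_tour targets doubles n doubles_pct = build_tour_alt targets doubles n doubles_pct
  unfold build_tour build_tour_alt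
  dsimp only
  set pct : Int := if doubles = [] then 0 else max 0 (min 100 doubles_pct) with hpct
  have h0 : 0 ≤ pct := by rw [hpct]; split <;> omega
  have h1 : pct ≤ 100 := by rw [hpct]; split <;> omega
  have hb := go_eq targets doubles pct h0 h1 n.toNat 0 []
  have hz : ndCount pct ((0 : Nat) : Int) = 0 := by
    simp [ndCount, PySem.Int.floordiv]
  rw [hz] at hb
  simp only [Nat.cast_zero, Int.toNat_zero, List.rotate_zero, zero_sub, neg_zero,
    zero_add, zero_mul] at hb
  have hmod0 : PySem.Int.mod 0 100 = 0 := by decide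
  rw [hmod0] at hb
  simp only [List.reverse_nil, List.nil_append] at hb
  by_cases hn : n ≤ 0
  · rw [PySem.List.pyRange_one_eq_nil hn]
    simp only [List.foldl_nil, List.reverse_nil]
    rw [show n.toNat = 0 by omega]
    rfl
  · have hcast : ((n.toNat : Nat) : Int) = n := by omega
    rw [← hcast, loop_invariant targets doubles pct h0 h1 n.toNat]
    simp only [Int.toNat_natCast, List.reverse_reverse]
    rw [hb]
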